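-- pv_equiv track=rewrite | github.com/MeganWestover/CSE210-Jumper | gusser-b.py | track_guesses
-- ===== SOURCE A (Python) =====
-- def track_guesses(word, gusses):
--     letters = ""
--     for letter in word:
--         if letter in gusses:
--             letters += letter
--         else:
--             letters = "*"
--     return letters
-- ===== SOURCE B (Python) =====
-- def track_guesses(word, gusses):
--     hits = ""
--     for letter in reversed(word):
--         if letter in gusses:
--             hits = letter + hits
--         else:
--             return "*" + hits
--     return word
-- ===== Notes on version B (the rewrite author's own statement) =====
-- stated objective: alternative
-- what changed: B scans the word in reverse and stops at the first miss (the last miss in forward order), returning '*' plus the collected trailing hits, instead of A's forward fold that rebuilds and resets the accumulator on every miss.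
import Mathlib
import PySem

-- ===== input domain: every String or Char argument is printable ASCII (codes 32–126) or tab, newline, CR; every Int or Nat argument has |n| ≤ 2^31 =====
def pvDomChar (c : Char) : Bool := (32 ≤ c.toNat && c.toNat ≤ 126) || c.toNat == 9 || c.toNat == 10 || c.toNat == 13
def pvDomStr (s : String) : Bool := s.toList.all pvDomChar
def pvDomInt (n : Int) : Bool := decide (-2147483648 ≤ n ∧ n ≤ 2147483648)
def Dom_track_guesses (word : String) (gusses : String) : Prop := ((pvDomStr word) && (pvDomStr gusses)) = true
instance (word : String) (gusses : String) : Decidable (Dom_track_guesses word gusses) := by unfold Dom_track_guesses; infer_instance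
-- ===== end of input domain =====

-- B replaces A's forward fold (which resets the accumulator on every miss) by a reverse scan that
-- stops at the first miss from the right; alternative decomposition, same results.

-- ===== PORT A =====
-- A's loop: letters = ""; for letter in word: letters += letter if letter in gusses else letters = "*"
-- 'letter in gusses' is a substring test on a one-char string = PySem.Chars.isIn [c] gusses.toList (exact).
def track_guesses (word : String) (gusses : String) : String :=
  String.ofList (word.toList.foldl
    (fun letters c => if PySem.Chars.isIn [c] gusses.toList then letters ++ [c] else ['*']) [])

-- ===== PORT B =====
-- B's loop: hits = ""; for letter in reversed(word): prepend on hit, on first miss return "*" + hits; else return word.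
def trackB_loop (gs : List Char) (full : List Char) : List Char → List Char → List Char
  | [], _hits => full
  | c :: rest, hits =>
      if PySem.Chars.isIn [c] gs then trackB_loop gs full rest (c :: hits) else '*' :: hits

def track_guesses_alt (word : String) (gusses : String) : String :=
  String.ofList (trackB_loop gusses.toList word.toList word.toList.reverse [])

-- ===== PRECONDITION & SPEC =====
def Spec_track_guesses (word : String) (gusses : String) (out : String) : Prop := out = track_guesses_alt word gusses
instance (word : String) (gusses : String) (out : String) : Decidable (Spec_track_guesses word gusses out) := by unfold Spec_track_guesses; infer_instance

-- ===== CLAIM (what is proved, stated in full; the proofs are below) =====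
def Claim_equal_track_guesses : Prop := ∀ (word : String) (gusses : String), Dom_track_guesses word gusses → Spec_track_guesses word gusses (track_guesses word gusses)

-- ===== LEMMAS AND PROOFS =====

-- A's fold over a run of hits just appends the run.
lemma foldA_allhit (gs : List Char) (l : List Char)
    (h : ∀ c ∈ l, PySem.Chars.isIn [c] gs = true) (s : List Char) :
    l.foldl (fun letters c => if PySem.Chars.isIn [c] gs then letters ++ [c] else ['*']) s
      = s ++ l := by
  induction l generalizing s with
  | nil => simp
  | cons c rest ih =>
    have hc : PySem.Chars.isIn [c] gs = true := h c (by simp)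
    simp [List.foldl_cons, hc, ih (fun d hd => h d (by simp [hd]))]

lemma trackB_loop_eq (gs : List Char) :
    ∀ (rl hits full : List Char), full = rl.reverse ++ hits →
      (∀ c ∈ hits, PySem.Chars.isIn [c] gs = true) →
      full.foldl (fun letters c => if PySem.Chars.isIn [c] gs then letters ++ [c] else ['*']) []
        = trackB_loop gs full rl hits := by
  intro rl
  induction rl with
  | nil =>
    intro hits full hfull hhits
    have h2 : full = hits := by simpa using hfull
    rw [h2]
    simpa [trackB_loop] using foldA_allhit gs hits hhits []
  | cons c rest ih =>
    intro hits full hfull hhits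
    have hfull' : full = rest.reverse ++ (c :: hits) := by simpa using hfull
    by_cases hc : PySem.Chars.isIn [c] gs = true
    · rw [show trackB_loop gs full (c :: rest) hits = trackB_loop gs full rest (c :: hits) from
        by simp [trackB_loop, hc]]
      exact ih (c :: hits) full hfull'
        (fun d hd => by rcases List.mem_cons.mp hd with h | h
                        · exact h ▸ hc
                        · exact hhits d h)
    · rw [show trackB_loop gs full (c :: rest) hits = '*' :: hits from by simp [trackB_loop, hc]]
      subst hfull'
      rw [List.foldl_append]
      simp only [List.foldl_cons, hc]
      exact foldA_allhit gs hits hhits ['*']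

-- ===== VERDICT (by name: the statement is the Claim_ definition above) =====
theorem track_guesses_spec : Claim_equal_track_guesses := by
  intro word gusses _
  unfold Spec_track_guesses track_guesses track_guesses_alt
  rw [trackB_loop_eq gusses.toList word.toList.reverse [] word.toList (by simp) (by simp)]
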